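-- pv_equiv track=rewrite | github.com/Alvaro1251/lexer | app.py | automata_oprel
-- ===== SOURCE A (Python) =====
-- ESTADO_FINAL = "ESTADO FINAL"
--
-- ESTADO_NO_FINAL = "NO ACEPTADO"
--
-- ESTADO_TRAMPA = "EN ESTADO TRAMPA"
--
-- def automata_oprel(lexema):
--     estado_actual = 0
--     estados_finales = [1, 2]
--     for caracter in lexema:
--         if estado_actual == 0 and caracter == '<':
--             estado_actual = 1
--         elif estado_actual == 0 and caracter == '>':
--             estado_actual = 1
--         elif estado_actual == 1 and caracter == '=':
--             estado_actual = 2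
--         else:
--             estado_actual = -1
--             break
--
--     if estado_actual == -1:
--         return ESTADO_TRAMPA
--     if estado_actual in estados_finales:
--         return ESTADO_FINAL
--     else:
--         return ESTADO_NO_FINAL
-- ===== SOURCE B (Python) =====
-- ESTADO_FINAL = "ESTADO FINAL"
-- ESTADO_NO_FINAL = "NO ACEPTADO"
-- ESTADO_TRAMPA = "EN ESTADO TRAMPA"
--
-- def automata_oprel(lexema):
--     cs = list(lexema)
--     if not cs:
--         return ESTADO_NO_FINAL
--     if cs[0] in ('<', '>') and (len(cs) == 1 or (len(cs) == 2 and cs[1] == '=')):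
--         return ESTADO_FINAL
--     return ESTADO_TRAMPA
-- ===== Notes on version B (the rewrite author's own statement) =====
-- stated objective: simpler
-- what changed: Replaced the state-machine loop with a direct, loop-free classification based on the lexeme's length and its first two characters.
import Mathlib
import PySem

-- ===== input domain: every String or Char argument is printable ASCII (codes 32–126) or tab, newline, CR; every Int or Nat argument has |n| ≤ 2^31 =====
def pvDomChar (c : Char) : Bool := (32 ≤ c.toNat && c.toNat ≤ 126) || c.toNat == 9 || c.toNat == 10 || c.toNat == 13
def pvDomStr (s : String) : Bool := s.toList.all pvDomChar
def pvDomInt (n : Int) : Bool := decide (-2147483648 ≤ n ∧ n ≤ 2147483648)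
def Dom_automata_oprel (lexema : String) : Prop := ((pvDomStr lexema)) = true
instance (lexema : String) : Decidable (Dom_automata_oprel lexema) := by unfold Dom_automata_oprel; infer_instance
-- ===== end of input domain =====

-- B replaces A's state-machine loop by a direct loop-free classification on the lexeme's length and first two characters (same results).
-- ===== PORT A =====
def automataLoopA (estado : Int) (cs : List Char) : Int :=
  match cs with
  | [] => estado
  | c :: rest =>
    if estado == 0 && c == '<' then automataLoopA 1 rest
    else if estado == 0 && c == '>' then automataLoopA 1 rest
    else if estado == 1 && c == '=' then automataLoopA 2 rest
    else -1  -- break: loop ends immediately with estado_actual = -1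

def automata_oprel (lexema : String) : String :=
  let estado_actual := automataLoopA 0 lexema.toList
  if estado_actual == -1 then "EN ESTADO TRAMPA"
  else if estado_actual == 1 || estado_actual == 2 then "ESTADO FINAL"
  else "NO ACEPTADO"

-- ===== PORT B =====
def automata_oprel_alt (lexema : String) : String :=
  match lexema.toList with
  | [] => "NO ACEPTADO"
  | c :: rest =>
    if (c == '<' || c == '>') && (rest.length == 0 || (rest.length == 1 && rest.headD ' ' == '=')) then
      "ESTADO FINAL"
    else "EN ESTADO TRAMPA"

-- ===== PRECONDITION & SPEC =====
def Spec_automata_oprel (lexema : String) (out : String) : Prop := out = automata_oprel_alt lexema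
instance (lexema : String) (out : String) : Decidable (Spec_automata_oprel lexema out) := by unfold Spec_automata_oprel; infer_instance

-- ===== CLAIM (what is proved, stated in full; the proofs are below) =====
def Claim_equal_automata_oprel : Prop := ∀ (lexema : String), Dom_automata_oprel lexema → Spec_automata_oprel lexema (automata_oprel lexema)

-- ===== LEMMAS AND PROOFS =====

-- ===== VERDICT (by name: the statement is the Claim_ definition above) =====
theorem automata_oprel_spec : Claim_equal_automata_oprel := by
  intro lexema _
  unfold Spec_automata_oprel automata_oprel automata_oprel_alt
  match h : lexema.toList with
  | [] => simp [automataLoopA]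
  | c :: rest =>
    by_cases hc : c = '<' ∨ c = '>'
    · match rest with
      | [] =>
        rcases hc with hc | hc <;> simp [hc, automataLoopA]
      | d :: rest2 =>
        by_cases hd : d = '='
        · match rest2 with
          | [] =>
            rcases hc with hc | hc <;> simp [hc, hd, automataLoopA]
          | e :: rest3 =>
            rcases hc with hc | hc <;>
              simp [hc, hd, automataLoopA, List.headD]
        · rcases hc with hc | hc <;>
            simp [hc, automataLoopA, List.headD, hd]
    · rw [not_or] at hc
      simp [automataLoopA, hc.1, hc.2]
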